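-- pv_equiv track=rewrite | github.com/ant4g/Python-code | code1.py | count
-- ===== SOURCE A (Python) =====
-- def count(word_list, min_length):
--     list = {}
--     for word in word_list:
--         if len(word) < min_length:
--             continue
--         elif word not in list:
--             list[word] = 1
--         else:
--             list[word] += 1
--
--     return list
-- ===== SOURCE B (Python) =====
-- def count(word_list, min_length):
--     kept = [w for w in word_list if len(w) >= min_length]
--     result = {}
--     for w in kept:
--         if w not in result:
--             result[w] = kept.count(w)
--     return result
-- ===== Notes on version B (the rewrite author's own statement) =====
-- stated objective: alternative
-- what changed: A counts in one pass, incrementing a per-word tally in the dict; B first filters the qualifying words into a list, then walks it inserting each first-seen word with its total list.count, so no increment of an existing entry ever happens.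
import Mathlib
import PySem

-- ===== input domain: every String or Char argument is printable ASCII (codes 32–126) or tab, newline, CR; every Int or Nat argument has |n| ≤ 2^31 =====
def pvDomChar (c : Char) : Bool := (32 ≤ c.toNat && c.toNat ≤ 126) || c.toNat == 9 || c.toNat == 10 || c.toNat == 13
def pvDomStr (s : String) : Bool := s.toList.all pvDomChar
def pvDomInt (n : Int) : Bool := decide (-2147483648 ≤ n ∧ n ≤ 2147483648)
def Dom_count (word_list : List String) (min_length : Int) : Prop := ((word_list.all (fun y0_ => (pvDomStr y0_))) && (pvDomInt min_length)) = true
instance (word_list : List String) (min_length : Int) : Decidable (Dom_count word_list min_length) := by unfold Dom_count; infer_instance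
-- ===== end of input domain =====

-- B replaces A's single tallying pass (increment per occurrence) by filter-then-insert-once with list.count; alternative decomposition, same results.

-- ===== PORT A =====
def count (word_list : List String) (min_length : Int) : List (String × Int) :=
  (word_list.foldl (fun d w =>
      if PySem.Str.len w < min_length then d
      else if d.contains w = false then d.insert w (1 : Int)
      else d.modify w 0 (· + 1))
    PySem.Dict.empty).items

-- ===== PORT B =====
def count_alt (word_list : List String) (min_length : Int) : List (String × Int) :=
  let kept := word_list.filter (fun w => min_length ≤ PySem.Str.len w)
  (kept.foldl (fun d w =>
      if d.contains w = false then d.insert w ((PySem.List.count kept w : Nat) : Int)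
      else d)
    PySem.Dict.empty).items

-- ===== PRECONDITION & SPEC =====
def Spec_count (word_list : List String) (min_length : Int) (out : List (String × Int)) : Prop := out = count_alt word_list min_length
instance (word_list : List String) (min_length : Int) (out : List (String × Int)) : Decidable (Spec_count word_list min_length out) := by unfold Spec_count; infer_instance

-- ===== CLAIM (what is proved, stated in full; the proofs are below) =====
def Claim_equal_count : Prop := ∀ (word_list : List String) (min_length : Int), Dom_count word_list min_length → Spec_count word_list min_length (count word_list min_length)

-- ===== LEMMAS AND PROOFS =====

-- first-occurrence dedup of ks ++ [w]
lemma pv_ofList_append_singleton (ks : List String) (w : String) :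
    PySem.Set.ofList (ks ++ [w]) =
      if w ∈ ks then PySem.Set.ofList ks else PySem.Set.ofList ks ++ [w] := by
  have h : PySem.Set.ofList (ks ++ [w]) = PySem.Set.add (PySem.Set.ofList ks) w := by
    simp [PySem.Set.ofList, List.foldl_append]
  rw [h]
  by_cases hw : w ∈ ks
  · rw [if_pos hw]
    simp [PySem.Set.add]
    exact hw
  · rw [if_neg hw]
    simp [PySem.Set.add]
    exact hw

-- membership in a dict whose items are a map over a key list
lemma pv_contains_of_items_map (d : PySem.Dict String Int) (s : List String)
    (g : String → Int) (h : d.items = s.map (fun w => (w, g w))) (v : String) :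
    d.contains v = (decide (v ∈ s)) := by
  simp only [PySem.Dict.contains, h, List.any_map, Function.comp_def]
  by_cases hv : v ∈ s
  · simp only [hv, decide_true]
    exact List.any_eq_true.mpr ⟨v, hv, by simp⟩
  · simp only [hv, decide_false]
    simp only [List.any_eq_false, beq_iff_eq]
    exact fun x hx hxv => hv (hxv ▸ hx)

-- A's tallying loop over ks produces exactly (distinct words in first-occurrence order, total counts)
lemma pv_A_fold_items (ks : List String) :
    (ks.foldl (fun d w =>
        if d.contains w = false then d.insert w (1 : Int)
        else d.modify w 0 (· + 1)) PySem.Dict.empty).items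
      = (PySem.Set.ofList ks).map (fun w => (w, (ks.count w : Int))) := by
  induction ks using List.reverseRecOn with
  | nil => simp [PySem.Set.ofList, PySem.Dict.empty]
  | append_singleton ks w ih =>
    rw [List.foldl_append]
    set d := ks.foldl (fun d w =>
        if d.contains w = false then d.insert w (1 : Int)
        else d.modify w 0 (· + 1)) PySem.Dict.empty with hd
    have hcont := pv_contains_of_items_map d (PySem.Set.ofList ks) _ ih
    rw [pv_ofList_append_singleton]
    by_cases hw : w ∈ ks
    · -- w already counted: A increments in place
      have hc : d.contains w = true := by
        rw [hcont]; simpa using hw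
      have hkeys : d.keys = PySem.Set.ofList ks := by
        simp [PySem.Dict.keys, ih, Function.comp_def]
      have hget : d.get? w = some ((ks.count w : Int)) := by
        apply PySem.Dict.get?_of_mem_items
        · rw [ih]
          exact List.mem_map_of_mem ((PySem.Set.mem_ofList ks w).mpr hw)
        · rw [hkeys]; exact PySem.Set.nodup_ofList ks
      simp only [List.foldl_cons, List.foldl_nil, hc, Bool.true_eq_false, if_false,
        PySem.Dict.modify, PySem.Dict.getD_eq_get?_getD, hget, Option.getD_some]
      rw [PySem.Dict.items_insert_of_contains d _ hc, ih, if_pos hw, List.map_map]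
      apply List.map_congr_left
      intro v hv
      have hvks : v ∈ ks := (PySem.Set.mem_ofList ks v).mp hv
      by_cases hvw : v = w
      · subst hvw
        simp [List.count_append]
      · simp [beq_iff_eq, List.count_append, List.count_singleton', hvw]
        exact fun h => hvw h.symm
    · -- fresh word: A appends it with count 1
      have hc : d.contains w = false := by
        rw [hcont]; simpa using hw
      simp only [List.foldl_cons, List.foldl_nil, hc, if_true]
      rw [PySem.Dict.items_insert_of_not_contains d _ hc, ih, if_neg hw, List.map_append]
      congr 1
      · apply List.map_congr_left
        intro v hv
        have hvks : v ∈ ks := (PySem.Set.mem_ofList ks v).mp hv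
        have hvw : v ≠ w := fun h => hw (h ▸ hvks)
        simp [List.count_append, List.count_singleton']
        exact fun h => hvw h.symm
      · have : ks.count w = 0 := List.count_eq_zero.mpr hw
        simp [List.count_append, this]

-- B's insert-once loop over ks with value function g lists each distinct word once, in order
lemma pv_B_fold_items (g : String → Int) (ks : List String) :
    (ks.foldl (fun d w =>
        if d.contains w = false then d.insert w (g w) else d) PySem.Dict.empty).items
      = (PySem.Set.ofList ks).map (fun w => (w, g w)) := by
  induction ks using List.reverseRecOn with
  | nil => simp [PySem.Set.ofList, PySem.Dict.empty]
  | append_singleton ks w ih =>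
    rw [List.foldl_append]
    set d := ks.foldl (fun d w =>
        if d.contains w = false then d.insert w (g w) else d) PySem.Dict.empty with hd
    have hcont := pv_contains_of_items_map d (PySem.Set.ofList ks) _ ih
    rw [pv_ofList_append_singleton]
    by_cases hw : w ∈ ks
    · have hc : d.contains w = true := by
        rw [hcont]; simp [(PySem.Set.mem_ofList ks w).mpr hw]
      simp [hc, ih, hw]
    · have hc : d.contains w = false := by
        rw [hcont]; simpa using hw
      simp only [List.foldl_cons, List.foldl_nil, hc, if_true]
      rw [PySem.Dict.items_insert_of_not_contains d _ hc, ih, if_neg hw, List.map_append]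
      simp

-- A's loop with the length guard inside is the same loop over the filtered list
lemma pv_A_filter (word_list : List String) (min_length : Int) :
    count word_list min_length =
      ((word_list.filter (fun w => min_length ≤ PySem.Str.len w)).foldl
        (fun d w => if d.contains w = false then d.insert w (1 : Int)
                    else d.modify w 0 (· + 1)) PySem.Dict.empty).items := by
  unfold count
  have hfn : (fun (d : PySem.Dict String Int) w =>
      if PySem.Str.len w < min_length then d
      else if d.contains w = false then d.insert w (1 : Int) else d.modify w 0 (· + 1))
      = (fun (d : PySem.Dict String Int) w =>
      if (decide (min_length ≤ PySem.Str.len w)) = true then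
        (if d.contains w = false then d.insert w (1 : Int) else d.modify w 0 (· + 1))
      else d) := by
    funext d w
    rcases lt_or_ge (PySem.Str.len w) min_length with h | h
    · rw [if_pos h, if_neg (fun hc => (not_le.mpr h) (of_decide_eq_true hc))]
    · rw [if_neg (not_lt.mpr h), if_pos (decide_eq_true h)]
  rw [hfn, ← List.foldl_filter]

-- ===== VERDICT (by name: the statement is the Claim_ definition above) =====
theorem count_spec : Claim_equal_count := by
  intro word_list min_length _
  unfold Spec_count count_alt
  rw [pv_A_filter, pv_A_fold_items, pv_B_fold_items]
  simp [PySem.List.count_eq]
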